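-- pv_equiv track=rewrite | github.com/zxc2007/sqlgo | tampers/chardoubleencode.py | tamper
-- ===== SOURCE A (Python) =====
-- import string
--
-- def tamper(payload, **kwargs):
--     """
--     Double URL-encodes all characters in a given payload (not processing already encoded) (e.g. SELECT -> %2553%2545%254C%2545%2543%2554)
--
--     Notes:
--         * Useful to bypass some weak web application firewalls that do not double URL-decode the request before processing it through their ruleset
--
--     >>> tamper('SELECT FIELD FROM%20TABLE')
--     '%2553%2545%254C%2545%2543%2554%2520%2546%2549%2545%254C%2544%2520%2546%2552%254F%254D%2520%2554%2541%2542%254C%2545'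
--     """
--
--     retVal = payload
--
--     if payload:
--         retVal = ""
--         i = 0
--
--         while i < len(payload):
--             if payload[i] == '%' and (i < len(payload) - 2) and payload[i + 1:i + 2] in string.hexdigits and payload[i + 2:i + 3] in string.hexdigits:
--                 retVal += '%%25%s' % payload[i + 1:i + 3]
--                 i += 3
--             else:
--                 retVal += '%%25%.2X' % ord(payload[i])
--                 i += 1
--
--     return retVal
-- ===== SOURCE B (Python) =====
-- import re
--
-- _TOKEN = re.compile(r'%[0-9a-fA-F]{2}|.', re.DOTALL)
--
-- def _repl(m):
--     s = m.group(0)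
--     if len(s) == 3:
--         return '%25' + s[1:]
--     return '%%25%.2X' % ord(s)
--
-- def tamper(payload, **kwargs):
--     if not payload:
--         return payload
--     return _TOKEN.sub(_repl, payload)
-- ===== Notes on version B (the rewrite author's own statement) =====
-- stated objective: faster
-- what changed: Replaced the manual index-advancing while loop that grows the result by repeated string concatenation with a single precompiled re.sub using a two-alternative pattern (an already-encoded percent-hex-hex triple, else any single character under DOTALL) and a replacement callback; the leftmost-first alternation reproduces the loop's preference for consuming an encoded triple.
import Mathlib
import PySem

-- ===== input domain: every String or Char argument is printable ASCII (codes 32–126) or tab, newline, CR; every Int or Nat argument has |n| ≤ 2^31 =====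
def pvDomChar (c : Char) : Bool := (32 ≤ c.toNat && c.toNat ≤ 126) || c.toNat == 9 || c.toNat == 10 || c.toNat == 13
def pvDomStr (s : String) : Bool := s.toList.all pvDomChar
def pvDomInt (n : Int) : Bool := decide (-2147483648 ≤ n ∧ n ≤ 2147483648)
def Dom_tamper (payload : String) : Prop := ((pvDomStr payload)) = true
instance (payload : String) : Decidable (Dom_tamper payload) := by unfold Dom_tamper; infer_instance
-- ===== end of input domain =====

-- B replaces A's index-advancing while loop by a regex tokenisation (leftmost-first
-- alternation '%[0-9a-fA-F]{2}|.') with a replacement callback, avoiding quadratic repeated string concatenation: objective 'faster'.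

-- shared helpers: string.hexdigits (= the regex class [0-9a-fA-F]) and '%.2X' % n
def pvHexChars : List Char := "0123456789abcdefABCDEF".toList
def pvHexDigit (n : Nat) : Char := "0123456789ABCDEF".toList.getD n '0'
-- '%.2X' % n, exact for 0 ≤ n < 256 (all chars admitted by Dom_tamper)
def pvHex2 (n : Nat) : List Char := [pvHexDigit (n / 16), pvHexDigit (n % 16)]

-- ===== PORT A =====
-- the while loop: i advances by 3 over an already-encoded '%XX', else by 1
def tamperLoop (cs : List Char) (i : Nat) (retVal : List Char) : List Char :=
  if i < cs.length then
    if PySem.List.pyGetD cs (i : Int) ' ' = '%' ∧ i < cs.length - 2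
        ∧ (PySem.List.slice cs (some ((i : Int) + 1)) (some ((i : Int) + 2))).all pvHexChars.contains
        ∧ (PySem.List.slice cs (some ((i : Int) + 2)) (some ((i : Int) + 3))).all pvHexChars.contains then
      tamperLoop cs (i + 3)
        (retVal ++ '%' :: '2' :: '5' :: PySem.List.slice cs (some ((i : Int) + 1)) (some ((i : Int) + 3)))
    else
      tamperLoop cs (i + 1)
        (retVal ++ '%' :: '2' :: '5' :: pvHex2 (PySem.List.pyGetD cs (i : Int) ' ').toNat)
  else retVal
termination_by cs.length - i

def tamper (payload : String) : String :=
  if payload.toList.isEmpty then payload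
  else String.ofList (tamperLoop payload.toList 0 [])

-- ===== PORT B =====
-- hand port of re.sub(r'%[0-9a-fA-F]{2}|.', repl, payload, flags=re.DOTALL): the
-- alternation is tried leftmost-first at each position and its alternatives cover
-- every character (DOTALL), so re.sub = tokenise the whole string, map the callback,
-- concatenate; exact on every input
def pvTokens : List Char → List (List Char)
  | [] => []
  | '%' :: a :: b :: rest' =>
    if pvHexChars.contains a && pvHexChars.contains b then ['%', a, b] :: pvTokens rest'
    else ['%'] :: pvTokens (a :: b :: rest')
  | c :: rest => [c] :: pvTokens rest
termination_by l => l.length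
decreasing_by all_goals (simp; try omega)

-- the replacement callback _repl
def pvRepl (s : List Char) : List Char :=
  if s.length = 3 then '%' :: '2' :: '5' :: s.drop 1
  else '%' :: '2' :: '5' :: pvHex2 (s.headD ' ').toNat

def tamper_alt (payload : String) : String :=
  if payload.toList.isEmpty then payload
  else String.ofList ((pvTokens payload.toList).map pvRepl).flatten

-- ===== PRECONDITION & SPEC =====
def Spec_tamper (payload : String) (out : String) : Prop := out = tamper_alt payload
instance (payload : String) (out : String) : Decidable (Spec_tamper payload out) := by unfold Spec_tamper; infer_instance

-- ===== CLAIM (what is proved, stated in full; the proofs are below) =====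
def Claim_equal_tamper : Prop := ∀ (payload : String), Dom_tamper payload → Spec_tamper payload (tamper payload)

-- ===== LEMMAS AND PROOFS =====

lemma pvTokens_cons_ne (c : Char) (rest : List Char) (hc : ¬ c = '%') :
    pvTokens (c :: rest) = [c] :: pvTokens rest := by
  match rest with
  | [] => simp [pvTokens]
  | [a] => simp [pvTokens]
  | a :: b :: r => simp [pvTokens, hc]

lemma tamperLoop_eq (cs : List Char) :
    ∀ n i acc, cs.length - i ≤ n →
      tamperLoop cs i acc = acc ++ ((pvTokens (cs.drop i)).map pvRepl).flatten := by
  intro n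
  induction n with
  | zero =>
    intro i acc h
    have hi : ¬ i < cs.length := by omega
    rw [tamperLoop, if_neg hi, List.drop_eq_nil_of_le (by omega)]
    simp [pvTokens]
  | succ n ih =>
    intro i acc h
    by_cases hi : i < cs.length
    · have hdrop : cs.drop i = cs[i] :: cs.drop (i + 1) := List.drop_eq_getElem_cons hi
      have hget : PySem.List.pyGetD cs (i : Int) ' ' = cs[i] := by
        rw [PySem.List.pyGetD_natCast, List.getD_eq_getElem cs ' ' hi]
      have e1 : ((i : Int) + 1) = ((i + 1 : Nat) : Int) := by push_cast; ring
      have e2 : ((i : Int) + 2) = ((i + 2 : Nat) : Int) := by push_cast; ring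
      have e3 : ((i : Int) + 3) = ((i + 3 : Nat) : Int) := by push_cast; ring
      have h12 : PySem.List.slice cs (some ((i : Int) + 1)) (some ((i : Int) + 2)) = (cs.drop (i+1)).take 1 := by
        rw [e1, e2, PySem.List.slice_natCast]; congr 1; omega
      have h23 : PySem.List.slice cs (some ((i : Int) + 2)) (some ((i : Int) + 3)) = ((cs.drop (i+1)).drop 1).take 1 := by
        rw [e2, e3, PySem.List.slice_natCast, List.drop_drop]; congr 1; omega
      have h13 : PySem.List.slice cs (some ((i : Int) + 1)) (some ((i : Int) + 3)) = (cs.drop (i+1)).take 2 := by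
        rw [e1, e3, PySem.List.slice_natCast]; congr 1; omega
      have hlen1 : (cs.drop (i+1)).length = cs.length - (i+1) := List.length_drop
      rw [tamperLoop, if_pos hi]
      rcases h1 : cs.drop (i+1) with _ | ⟨a, _ | ⟨b, rest2⟩⟩
      · have hll : cs.length ≤ i + 1 := by
          have := hlen1; rw [h1] at this; simp at this; omega
        rw [if_neg (by rintro ⟨-, h2, -⟩; omega)]
        rw [ih (i+1) _ (by omega), hdrop, h1, hget]
        simp [pvTokens, pvRepl]
      · have hll : cs.length = i + 2 := by
          have := hlen1; rw [h1] at this; simp at this; omega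
        rw [if_neg (by rintro ⟨-, h2, -⟩; omega)]
        rw [ih (i+1) _ (by omega), hdrop, h1, hget]
        simp [pvTokens, pvRepl]
      · have hll : i < cs.length - 2 := by
          have := hlen1; rw [h1] at this; simp at this; omega
        by_cases hc : cs[i] = '%'
        · by_cases hx : (pvHexChars.contains a && pvHexChars.contains b) = true
          · rw [if_pos ⟨by rw [hget, hc], hll, by rw [h12, h1]; simp_all, by rw [h23, h1]; simp_all⟩]
            have hd3 : cs.drop (i+3) = rest2 := by
              have h' : cs.drop (i+3) = (cs.drop (i+1)).drop 2 := by rw [List.drop_drop]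
              rw [h', h1]; rfl
            rw [ih (i+3) _ (by omega), hdrop, h1, hd3, h13, h1, hc]
            have hx' : a ∈ pvHexChars ∧ b ∈ pvHexChars := by simpa using hx
            simp [pvTokens, pvRepl, hx'.1, hx'.2]
          · rw [if_neg (by
              rintro ⟨-, -, ha, hb⟩
              rw [h12, h1] at ha; rw [h23, h1] at hb
              simp at ha hb; simp [ha, hb] at hx)]
            rw [ih (i+1) _ (by omega), hdrop, h1, hget, hc]
            have hx' : ¬(a ∈ pvHexChars ∧ b ∈ pvHexChars) := by simpa using hx
            simp [pvTokens, pvRepl, hx']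
        · rw [if_neg (by rintro ⟨h0, -⟩; rw [hget] at h0; exact hc h0)]
          rw [ih (i+1) _ (by omega), hdrop, hget, pvTokens_cons_ne _ _ hc]
          simp [pvRepl]
    · rw [tamperLoop, if_neg hi, List.drop_eq_nil_of_le (by omega)]
      simp [pvTokens]

-- ===== VERDICT (by name: the statement is the Claim_ definition above) =====
theorem tamper_spec : Claim_equal_tamper := by
  intro payload _
  unfold Spec_tamper tamper tamper_alt
  by_cases hmt : payload.toList.isEmpty
  · simp [hmt]
  · simp only [hmt]
    rw [tamperLoop_eq payload.toList payload.toList.length 0 [] (by omega)]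
    simp
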